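-- pv_equiv track=rewrite | github.com/HaardTrivedi/ITI1120 | Assignments/Assignment 2/a2_part_2_300021545.py | oPify
-- ===== SOURCE A (Python) =====
-- def oPify(s):
--     '''(string) -> string
--     Preconditions: Enter a string with quatations
--     The function returns a string with 'o' and 'p' included between two letters with them being capital if the letters are capital'''
--     l = list(s)
--     for i in range(len(l)-1):
--         if len(l)==1:
--             return l
--         elif len(l)>1:
--             if i<len(l)-1:
--                 if l[i] >= 'a' and l[i] <= 'z':
--                     l[i] = str(l[i])+'o'
--                     if l[i+1] >= 'a' and l[i+1] <= 'z':
--                         l[i+1] = 'p'+str(l[i+1])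
--                     elif l[i+1] >= 'A' and l[i+1] <= 'Z':
--                         l[i+1] = 'P'+str(l[i+1])
--                 elif l[i] >= 'A' and l[i] <= 'Z':
--                     l[i] = str(l[i])+'O'
--                     if l[i+1] >= 'a' and l[i+1] <= 'z':
--                         l[i+1] = 'p'+str(l[i+1])
--                     elif l[i+1] >= 'A' and l[i+1] <= 'Z':
--                         l[i+1] = 'P'+str(l[i+1])
--     return ''.join(l)
-- ===== SOURCE B (Python) =====
-- def oPify(s):
--     n = len(s)
--     pieces = []
--     for i, c in enumerate(s):
--         is_letter = ('a' <= c <= 'z') or ('A' <= c <= 'Z')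
--         lower = 'a' <= c <= 'z'
--         piece = c
--         if is_letter and i >= 1:
--             p = s[i - 1]
--             if ('a' <= p <= 'z') or ('A' <= p <= 'Z'):
--                 piece = ('p' if lower else 'P') + piece
--         if is_letter and i < n - 1:
--             piece = piece + ('o' if lower else 'O')
--         pieces.append(piece)
--     return ''.join(pieces)
-- ===== Notes on version B (the rewrite author's own statement) =====
-- stated objective: simpler
-- what changed: B replaces A's in-place mutation of a char list (which re-reads previously written multi-character cells with lexicographic string comparisons) by a single stateless pass over the original string that decides each output piece from the character and its left neighbour only.
import Mathlib
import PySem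

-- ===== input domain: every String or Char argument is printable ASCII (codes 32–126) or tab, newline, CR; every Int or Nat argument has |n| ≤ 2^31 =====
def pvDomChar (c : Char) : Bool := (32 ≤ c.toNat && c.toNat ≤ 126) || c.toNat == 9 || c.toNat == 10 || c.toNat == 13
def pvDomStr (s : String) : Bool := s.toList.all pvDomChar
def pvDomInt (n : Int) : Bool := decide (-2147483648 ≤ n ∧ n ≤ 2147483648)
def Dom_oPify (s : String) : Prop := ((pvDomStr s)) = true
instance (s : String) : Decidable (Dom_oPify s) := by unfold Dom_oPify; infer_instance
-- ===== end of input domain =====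

-- B rebuilds the string in one stateless forward pass over the original characters
-- (neighbour lookups) instead of A's in-place list mutation that re-reads mutated cells: simpler.


-- ===== PORT A =====
-- Python's lexicographic string `<=` on lists of chars (exact)
def pyStrLe : List Char → List Char → Bool
  | [], _ => true
  | _ :: _, [] => false
  | a :: as, b :: bs => decide (a < b) || (a == b && pyStrLe as bs)

-- body of A's `for i in range(len(l)-1)` loop; state is the mutable list of strings
def oPifyBody (l : List (List Char)) (i : Int) : List (List Char) :=
  if l.length == 1 then l  -- Python's `return l` — unreachable: the loop only runs when len(l) ≥ 2
  else if decide (1 < l.length) then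
    if decide (i < (l.length : Int) - 1) then
      let li := PySem.List.pyGetD l i []
      if pyStrLe ['a'] li && pyStrLe li ['z'] then
        let l1 := PySem.List.pySetD l i (li ++ ['o'])
        let li1 := PySem.List.pyGetD l1 (i + 1) []
        if pyStrLe ['a'] li1 && pyStrLe li1 ['z'] then PySem.List.pySetD l1 (i + 1) ('p' :: li1)
        else if pyStrLe ['A'] li1 && pyStrLe li1 ['Z'] then PySem.List.pySetD l1 (i + 1) ('P' :: li1)
        else l1
      else if pyStrLe ['A'] li && pyStrLe li ['Z'] then
        let l1 := PySem.List.pySetD l i (li ++ ['O'])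
        let li1 := PySem.List.pyGetD l1 (i + 1) []
        if pyStrLe ['a'] li1 && pyStrLe li1 ['z'] then PySem.List.pySetD l1 (i + 1) ('p' :: li1)
        else if pyStrLe ['A'] li1 && pyStrLe li1 ['Z'] then PySem.List.pySetD l1 (i + 1) ('P' :: li1)
        else l1
      else l
    else l
  else l

def oPify (s : String) : String :=
  let l0 : List (List Char) := s.toList.map (fun c => [c])
  let l := (PySem.List.pyRange 0 ((l0.length : Int) - 1) 1).foldl oPifyBody l0
  String.mk l.flatten  -- ''.join(l)

-- ===== PORT B =====
def isLetterB (c : Char) : Bool :=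
  (decide ('a' ≤ c) && decide (c ≤ 'z')) || (decide ('A' ≤ c) && decide (c ≤ 'Z'))

def pieceB (cs : List Char) (n : Int) (i : Int) (c : Char) : List Char :=
  let isL := isLetterB c
  let lower := decide ('a' ≤ c) && decide (c ≤ 'z')
  let piece := [c]
  let piece :=
    if isL && decide (1 ≤ i) then
      let p := PySem.List.pyGetD cs (i - 1) ' '
      if isLetterB p then (if lower then 'p' else 'P') :: piece else piece
    else piece
  if isL && decide (i < n - 1) then piece ++ [if lower then 'o' else 'O'] else piece

def oPify_alt (s : String) : String :=
  let cs := s.toList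
  let n : Int := cs.length
  String.mk (((PySem.List.enumerate cs).map (fun p => pieceB cs n p.1 p.2)).flatten)

-- ===== PRECONDITION & SPEC =====
def Spec_oPify (s : String) (out : String) : Prop := out = oPify_alt s
instance (s : String) (out : String) : Decidable (Spec_oPify s out) := by unfold Spec_oPify; infer_instance

-- ===== CLAIM (what is proved, stated in full; the proofs are below) =====
def Claim_equal_oPify : Prop := ∀ (s : String), Dom_oPify s → Spec_oPify s (oPify s)

-- ===== LEMMAS AND PROOFS =====

def pChar (c : Char) : Char := if decide ('a' ≤ c) && decide (c ≤ 'z') then 'p' else 'P'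
def oChar (c : Char) : Char := if decide ('a' ≤ c) && decide (c ≤ 'z') then 'o' else 'O'

def pfx (cs : List Char) (i : Nat) (c : Char) : List Char :=
  if isLetterB c && decide (1 ≤ i) && isLetterB ((cs[i - 1]?).getD ' ') then [pChar c] else []

def sfx (n : Nat) (i : Nat) (c : Char) : List Char :=
  if isLetterB c && decide (i < n - 1) then [oChar c] else []

def pieceAt (cs : List Char) (j : Nat) : List Char :=
  pfx cs j ((cs[j]?).getD ' ') ++ [(cs[j]?).getD ' '] ++ sfx cs.length j ((cs[j]?).getD ' ')

def stateK (cs : List Char) (k : Nat) : List (List Char) :=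
  ((List.range k).map (pieceAt cs)) ++
    (pfx cs k ((cs[k]?).getD ' ') ++ [(cs[k]?).getD ' ']) :: (cs.drop (k + 1)).map (fun c => [c])

-- the new value A writes at position i+1
def nb (c' : Char) : List Char :=
  if decide ('a' ≤ c') && decide (c' ≤ 'z') then ['p', c']
  else if decide ('A' ≤ c') && decide (c' ≤ 'Z') then ['P', c'] else [c']

theorem pyStrLe_single (a b : Char) : pyStrLe [a] [b] = decide (a ≤ b) := by
  rcases lt_trichotomy a b with h | h | h
  · simp [pyStrLe, h, le_of_lt h]
  · subst h; simp [pyStrLe]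
  · simp [pyStrLe, lt_asymm h, not_le.mpr h, (ne_of_lt h).symm]

theorem pyStrLe_a_pc (c : Char) : pyStrLe ['a'] ['p', c] = true := by
  simp [pyStrLe, (by decide : 'a' < 'p')]

theorem pyStrLe_pc_z (c : Char) : pyStrLe ['p', c] ['z'] = true := by
  simp [pyStrLe, (by decide : 'p' < 'z')]

theorem pyStrLe_a_Pc (c : Char) : pyStrLe ['a'] ['P', c] = false := by
  simp [pyStrLe, (by decide : ¬ 'a' < 'P'), (by decide : ¬ ('a' = 'P'))]

theorem pyStrLe_A_Pc (c : Char) : pyStrLe ['A'] ['P', c] = true := by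
  simp [pyStrLe, (by decide : 'A' < 'P')]

theorem pyStrLe_Pc_Z (c : Char) : pyStrLe ['P', c] ['Z'] = true := by
  simp [pyStrLe, (by decide : 'P' < 'Z')]

theorem pChar_low (c : Char) (h1 : 'a' ≤ c) (h2 : c ≤ 'z') : pChar c = 'p' := by
  unfold pChar
  rw [decide_eq_true h1, decide_eq_true h2]
  rfl

theorem and_decide_false (p q : Prop) [Decidable p] [Decidable q] (h : ¬ (p ∧ q)) :
    (decide p && decide q) = false := by
  by_cases hp : p
  · have hq : ¬ q := fun hq => h ⟨hp, hq⟩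
    rw [decide_eq_false hq, Bool.and_false]
  · rw [decide_eq_false hp, Bool.false_and]

theorem pChar_notlow (c : Char) (h : ¬ ('a' ≤ c ∧ c ≤ 'z')) : pChar c = 'P' := by
  unfold pChar
  rw [and_decide_false _ _ h]
  rfl

theorem test_low_true (cs : List Char) (k : Nat) (c : Char) (h1 : 'a' ≤ c) (h2 : c ≤ 'z') :
    (pyStrLe ['a'] (pfx cs k c ++ [c]) && pyStrLe (pfx cs k c ++ [c]) ['z']) = true := by
  unfold pfx
  split_ifs with hG
  · rw [pChar_low c h1 h2, List.singleton_append, pyStrLe_a_pc, pyStrLe_pc_z]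
    rfl
  · rw [List.nil_append, pyStrLe_single, pyStrLe_single, decide_eq_true h1, decide_eq_true h2]
    rfl

theorem test_low_false (cs : List Char) (k : Nat) (c : Char) (h : ¬ ('a' ≤ c ∧ c ≤ 'z')) :
    (pyStrLe ['a'] (pfx cs k c ++ [c]) && pyStrLe (pfx cs k c ++ [c]) ['z']) = false := by
  unfold pfx
  split_ifs with hG
  · rw [pChar_notlow c h, List.singleton_append, pyStrLe_a_Pc, Bool.false_and]
  · rw [List.nil_append, pyStrLe_single, pyStrLe_single, and_decide_false _ _ h]

theorem test_up_true (cs : List Char) (k : Nat) (c : Char) (hnl : ¬ ('a' ≤ c ∧ c ≤ 'z'))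
    (h1 : 'A' ≤ c) (h2 : c ≤ 'Z') :
    (pyStrLe ['A'] (pfx cs k c ++ [c]) && pyStrLe (pfx cs k c ++ [c]) ['Z']) = true := by
  unfold pfx
  split_ifs with hG
  · rw [pChar_notlow c hnl, List.singleton_append, pyStrLe_A_Pc, pyStrLe_Pc_Z]
    rfl
  · rw [List.nil_append, pyStrLe_single, pyStrLe_single, decide_eq_true h1, decide_eq_true h2]
    rfl

theorem isLetterB_false (c : Char) (hnl : ¬ ('a' ≤ c ∧ c ≤ 'z')) (hnu : ¬ ('A' ≤ c ∧ c ≤ 'Z')) :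
    isLetterB c = false := by
  unfold isLetterB
  rw [and_decide_false _ _ hnl, and_decide_false _ _ hnu]
  rfl

theorem test_up_false (cs : List Char) (k : Nat) (c : Char) (hnl : ¬ ('a' ≤ c ∧ c ≤ 'z'))
    (hnu : ¬ ('A' ≤ c ∧ c ≤ 'Z')) :
    (pyStrLe ['A'] (pfx cs k c ++ [c]) && pyStrLe (pfx cs k c ++ [c]) ['Z']) = false := by
  unfold pfx
  rw [isLetterB_false c hnl hnu, Bool.false_and, Bool.false_and, if_neg (by simp), List.nil_append,
    pyStrLe_single, pyStrLe_single, and_decide_false _ _ hnu]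

theorem pfx_succ (cs : List Char) (k : Nat) (c' : Char) :
    pfx cs (k + 1) c' = if isLetterB c' && isLetterB ((cs[k]?).getD ' ') then [pChar c'] else [] := by
  simp [pfx]

theorem nb_pfx (cs : List Char) (k : Nat) (c' : Char) (h : isLetterB ((cs[k]?).getD ' ') = true) :
    nb c' = pfx cs (k + 1) c' ++ [c'] := by
  rw [pfx_succ, h, Bool.and_true]
  cases hl : (decide ('a' ≤ c') && decide (c' ≤ 'z')) <;>
    cases hu : (decide ('A' ≤ c') && decide (c' ≤ 'Z')) <;>
      simp [nb, isLetterB, pChar, hl, hu]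

theorem oPifyBody_eq (P : List (List Char)) (m : List Char) (c' : Char) (R : List (List Char)) :
    oPifyBody (P ++ m :: [c'] :: R) (P.length : Int) =
      (if pyStrLe ['a'] m && pyStrLe m ['z'] then P ++ (m ++ ['o']) :: nb c' :: R
       else if pyStrLe ['A'] m && pyStrLe m ['Z'] then P ++ (m ++ ['O']) :: nb c' :: R
       else P ++ m :: [c'] :: R) := by
  have hlen : (P ++ m :: [c'] :: R).length = P.length + R.length + 2 := by
    simp; omega
  have h1 : (P.length + R.length + 2 == 1) = false := by
    rw [beq_eq_false_iff_ne]; omega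
  have h2 : decide (1 < P.length + R.length + 2) = true := by
    rw [decide_eq_true_eq]; omega
  have h3 : decide ((P.length : Int) < ((P.length + R.length + 2 : Nat) : Int) - 1) = true := by
    rw [decide_eq_true_eq]; push_cast; omega
  have hg0 : PySem.List.pyGetD (P ++ m :: [c'] :: R) (P.length : Int) [] = m := by
    rw [PySem.List.pyGetD_natCast, List.getD_append_right _ _ _ _ le_rfl]; simp
  have hs0 : ∀ v, PySem.List.pySetD (P ++ m :: [c'] :: R) (P.length : Int) v = P ++ v :: [c'] :: R := by
    intro v
    rw [PySem.List.pySetD_natCast, List.set_append_right _ _ le_rfl]; simp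
  have hg1 : ∀ v : List Char, PySem.List.pyGetD (P ++ v :: [c'] :: R) ((P.length : Int) + 1) [] = [c'] := by
    intro v
    rw [show ((P.length : Int) + 1) = ((P.length + 1 : Nat) : Int) by push_cast; ring]
    rw [PySem.List.pyGetD_natCast, List.getD_append_right _ _ _ _ (by omega)]
    simp
  have hs1 : ∀ v w : List Char,
      PySem.List.pySetD (P ++ v :: [c'] :: R) ((P.length : Int) + 1) w = P ++ v :: w :: R := by
    intro v w
    rw [show ((P.length : Int) + 1) = ((P.length + 1 : Nat) : Int) by push_cast; ring]
    rw [PySem.List.pySetD_natCast, List.set_append_right _ _ (by omega)]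
    simp
  unfold oPifyBody
  simp only [hlen, h1, h2, h3, hg0, hs0, hg1, hs1, pyStrLe_single, nb,
    Bool.false_eq_true, if_false, if_true]
  cases hm1 : (pyStrLe ['a'] m && pyStrLe m ['z']) <;>
    cases hm2 : (pyStrLe ['A'] m && pyStrLe m ['Z']) <;>
      cases hc1 : (decide ('a' ≤ c') && decide (c' ≤ 'z')) <;>
        cases hc2 : (decide ('A' ≤ c') && decide (c' ≤ 'Z')) <;>
          simp [hm1, hm2, hc1, hc2]

theorem pieceB_eq_nat (cs : List Char) (k : Nat) (c : Char) :
    pieceB cs (cs.length : Int) (k : Int) c = pfx cs k c ++ [c] ++ sfx cs.length k c := by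
  cases k with
  | zero =>
    have e2 : decide (((0:Nat):Int) < (cs.length : Int) - 1) = decide (0 < cs.length - 1) := by
      simp only [decide_eq_decide]; omega
    have e1 : decide (1 ≤ ((0:Nat):Int)) = false := by decide
    have e0 : decide (1 ≤ (0:Nat)) = false := by decide
    simp only [pieceB, pfx, sfx, pChar, oChar, e0, e1, e2, Bool.and_false, Bool.false_and,
      Bool.false_eq_true, if_false]
    cases hd : (isLetterB c && decide (0 < cs.length - 1)) <;> simp [hd]
  | succ k =>
    have e2 : decide (((k+1:Nat):Int) < (cs.length : Int) - 1) = decide (k + 1 < cs.length - 1) := by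
      simp only [decide_eq_decide]; omega
    have e1 : decide (1 ≤ ((k+1:Nat):Int)) = true := by
      rw [decide_eq_true_eq]; push_cast; omega
    have e0 : decide (1 ≤ k + 1) = true := by simp
    have e3 : (((k+1:Nat):Int) - 1) = ((k:Nat):Int) := by push_cast; ring
    simp only [pieceB, pfx, sfx, pChar, oChar, e0, e1, e2, e3, PySem.List.pyGetD_natCast,
      List.getD_eq_getElem?_getD, Nat.add_sub_cancel, Bool.and_true]
    cases hL : isLetterB c <;> cases hP : isLetterB ((cs[k]?).getD ' ') <;>
      cases hd : decide (k + 1 < cs.length - 1) <;> simp [hL, hP, hd]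

theorem step_lemma (cs : List Char) (k : Nat) (h : k + 2 ≤ cs.length) :
    oPifyBody (stateK cs k) (k : Int) = stateK cs (k + 1) := by
  have hk1 : k + 1 < cs.length := by omega
  have hdrop : cs.drop (k + 1) = (cs[k + 1]?).getD ' ' :: cs.drop (k + 2) := by
    rw [List.drop_eq_getElem_cons hk1]
    simp [List.getElem?_eq_getElem hk1]
  rw [stateK, hdrop]
  simp only [List.map_cons]
  rw [show ((k : Nat) : Int) = (((List.range k).map (pieceAt cs)).length : Int) by simp]
  rw [oPifyBody_eq]
  conv_rhs => rw [stateK]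
  simp only [List.range_succ, List.map_append, List.map_cons, List.map_nil, List.append_assoc,
    List.singleton_append]
  have hsfxk : decide (k < cs.length - 1) = true := by rw [decide_eq_true_eq]; omega
  by_cases hlow : ('a' ≤ (cs[k]?).getD ' ' ∧ (cs[k]?).getD ' ' ≤ 'z')
  · have hLc : isLetterB ((cs[k]?).getD ' ') = true := by
      unfold isLetterB
      rw [decide_eq_true hlow.1, decide_eq_true hlow.2]
      rfl
    rw [test_low_true _ _ _ hlow.1 hlow.2, nb_pfx cs k _ hLc, if_pos rfl]
    have hpiece : pieceAt cs k = pfx cs k ((cs[k]?).getD ' ') ++ [(cs[k]?).getD ' '] ++ ['o'] := by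
      simp [pieceAt, sfx, oChar, hLc, hsfxk, hlow.1, hlow.2]
    rw [hpiece]
    simp [List.append_assoc]
  · by_cases hup : ('A' ≤ (cs[k]?).getD ' ' ∧ (cs[k]?).getD ' ' ≤ 'Z')
    · have hLc : isLetterB ((cs[k]?).getD ' ') = true := by
        unfold isLetterB
        rw [decide_eq_true hup.1, decide_eq_true hup.2]
        simp
      rw [test_low_false _ _ _ hlow, test_up_true _ _ _ hlow hup.1 hup.2, nb_pfx cs k _ hLc]
      simp only [Bool.false_eq_true, if_false, if_pos rfl]
      have hpiece : pieceAt cs k = pfx cs k ((cs[k]?).getD ' ') ++ [(cs[k]?).getD ' '] ++ ['O'] := by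
        simp [pieceAt, sfx, oChar, hLc, hsfxk, hlow]
      rw [hpiece]
      simp [List.append_assoc]
    · have hLf : isLetterB ((cs[k]?).getD ' ') = false := isLetterB_false _ hlow hup
      rw [test_low_false _ _ _ hlow, test_up_false _ _ _ hlow hup]
      simp only [Bool.false_eq_true, if_false]
      have hpiece : pieceAt cs k = pfx cs k ((cs[k]?).getD ' ') ++ [(cs[k]?).getD ' '] := by
        simp [pieceAt, sfx, hLf]
      have hpfx' : pfx cs (k + 1) ((cs[k + 1]?).getD ' ') = [] := by
        rw [pfx_succ, hLf]; simp
      rw [hpiece, hpfx']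
      simp

theorem inv_lemma (cs : List Char) (hne : cs ≠ []) (k : Nat) (hk : k ≤ cs.length - 1) :
    (PySem.List.pyRange 0 (k : Int) 1).foldl oPifyBody (cs.map (fun c => [c])) = stateK cs k := by
  induction k with
  | zero =>
    have h0 : PySem.List.pyRange 0 ((0:Nat) : Int) 1 = [] := by
      rw [PySem.List.pyRange_zero_natCast]; rfl
    rw [h0]
    cases cs with
    | nil => exact absurd rfl hne
    | cons c t => simp [stateK, pfx]
  | succ k ih =>
    rw [show ((k+1:Nat):Int) = ((k:Nat):Int) + 1 by push_cast; ring]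
    rw [PySem.List.pyRange_one_succ_right (Int.natCast_nonneg k)]
    rw [List.foldl_append]
    rw [ih (by omega)]
    simp only [List.foldl_cons, List.foldl_nil]
    exact step_lemma cs k (by omega)

theorem flatten_eq (cs : List Char) (hne : cs ≠ []) :
    (stateK cs (cs.length - 1)).flatten =
      ((PySem.List.enumerate cs).map (fun p => pieceB cs (cs.length : Int) p.1 p.2)).flatten := by
  have hn : 1 ≤ cs.length := List.length_pos_iff.mpr hne
  have hR : ((PySem.List.enumerate cs).map (fun p => pieceB cs (cs.length : Int) p.1 p.2)) =
      (List.range cs.length).map (pieceAt cs) := by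
    rw [PySem.List.enumerate_eq_map_pyRange cs ' ', PySem.List.len_eq,
      PySem.List.pyRange_zero_natCast, List.map_map, List.map_map]
    apply List.map_congr_left
    intro k hk
    simp only [Function.comp, PySem.List.pyGetD_natCast]
    rw [pieceB_eq_nat]
    rfl
  rw [hR]
  obtain ⟨n, hn'⟩ : ∃ n, cs.length = n + 1 := ⟨cs.length - 1, by omega⟩
  have hdrop : cs.drop (n + 1) = [] := by rw [← hn']; exact List.drop_length
  have hsfx : sfx cs.length n ((cs[n]?).getD ' ') = [] := by
    simp [sfx, hn']
  rw [stateK, hn']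
  simp only [Nat.add_sub_cancel, hdrop, List.map_nil, List.range_succ, List.map_append,
    List.map_cons, List.map_nil]
  simp [pieceAt, hsfx]

theorem oPify_def (s : String) :
    oPify s = String.mk (((PySem.List.pyRange 0 (((s.toList.map (fun c => [c])).length : Int) - 1) 1).foldl
      oPifyBody (s.toList.map (fun c => [c]))).flatten) := rfl

theorem oPify_alt_def (s : String) :
    oPify_alt s = String.mk
      (((PySem.List.enumerate s.toList).map
        (fun p => pieceB s.toList ((s.toList.length : Int)) p.1 p.2)).flatten) := rfl

-- ===== VERDICT (by name: the statement is the Claim_ definition above) =====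
theorem oPify_spec : Claim_equal_oPify := by
  intro s _
  show oPify s = oPify_alt s
  rw [oPify_def, oPify_alt_def]
  by_cases hne : s.toList = []
  · rw [hne]; rfl
  · have hlen1 : 1 ≤ s.toList.length := List.length_pos_iff.mpr hne
    have hcast : (((s.toList.map (fun c => [c])).length : Int) - 1) = ((s.toList.length - 1 : Nat) : Int) := by
      rw [List.length_map, Nat.cast_sub hlen1, Nat.cast_one]
    rw [hcast, inv_lemma s.toList hne (s.toList.length - 1) le_rfl, flatten_eq s.toList hne]
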